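-- pv_equiv track=rewrite | github.com/alessiabidian/FP-Python | Proiect Lab 7-9/service/grades_service.py | sort_list_by_nrnote_desc
-- ===== SOURCE A (Python) =====
-- def sort_list_by_nrnote_desc(lab_list, nrnote_list):
--     """
--     Returneaza 2 liste sortate: cu laboratoare si cu note
--     :param lab_list:
--     :type lab_list: list
--     :param nrnote_list:
--     :type nrnote_list: list
--     :return: liste sortate
--     :rtype: list of Laborator objects, list of nrnote
--     """
--     sorted_list_lab = lab_list
--     sorted_nrnote_list = nrnote_list
--     for i in range(len(sorted_list_lab) - 1):
--         for j in range(i + 1, len(sorted_list_lab)):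
--             if sorted_nrnote_list[i] <= sorted_nrnote_list[j]:
--                 nr = sorted_nrnote_list[i]
--                 sorted_nrnote_list[i] = sorted_nrnote_list[j]
--                 sorted_nrnote_list[j] = nr
--
--                 lab = sorted_list_lab[j]
--                 sorted_list_lab[j] = sorted_list_lab[i]
--                 sorted_list_lab[i] = lab
--
--     return sorted_list_lab, sorted_nrnote_list
-- ===== SOURCE B (Python) =====
-- def sort_list_by_nrnote_desc(lab_list, nrnote_list):
--     """
--     Returneaza 2 liste sortate: cu laboratoare si cu note
--     Sorts the parallel lists by grade, descending; equal grades come out in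
--     reverse original order.  Writes the results back in place and returns them.
--     """
--     order = sorted(range(len(lab_list)), key=lambda i: (-nrnote_list[i], -i))
--     labs = [lab_list[i] for i in order]
--     grades = [nrnote_list[i] for i in order]
--     for k in range(len(order)):
--         lab_list[k] = labs[k]
--         nrnote_list[k] = grades[k]
--     return lab_list, nrnote_list
-- ===== Notes on version B (the rewrite author's own statement) =====
-- stated objective: faster
-- what changed: A's O(n^2) nested swap-on-<= selection loops are replaced by one O(n log n) sort of the index list under the key (-grade, -index) (grade descending, ties in reverse original order), after which both lists are gathered in that order and written back in place; Pre_ excludes pairs where nrnote_list is shorter than lab_list: there A raises IndexError, except in the degenerate one-lab case where its loops never run and it returns the lists unsorted (an accident of the loop bounds), and B raises there too.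
-- outside the precondition, e.g. on sort_list_by_nrnote_desc([7], []): A returns ([7], []), B raises IndexError
import Mathlib
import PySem

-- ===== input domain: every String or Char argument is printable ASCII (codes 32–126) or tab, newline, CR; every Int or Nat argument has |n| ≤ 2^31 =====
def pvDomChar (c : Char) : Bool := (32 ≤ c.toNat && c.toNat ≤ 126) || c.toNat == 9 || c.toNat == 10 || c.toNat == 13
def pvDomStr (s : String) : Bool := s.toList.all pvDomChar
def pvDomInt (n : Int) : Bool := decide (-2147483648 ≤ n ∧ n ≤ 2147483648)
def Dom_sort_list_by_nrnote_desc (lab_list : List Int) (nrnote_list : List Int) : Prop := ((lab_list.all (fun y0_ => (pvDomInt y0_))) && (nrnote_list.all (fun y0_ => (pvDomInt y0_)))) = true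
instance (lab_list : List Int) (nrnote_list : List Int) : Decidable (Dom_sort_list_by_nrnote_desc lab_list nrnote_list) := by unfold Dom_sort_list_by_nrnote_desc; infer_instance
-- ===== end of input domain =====

-- B replaces A's quadratic double-swap loops by one sort of the index list under the
-- key (-grade, -index); equivalence is about the RETURN value only (both Pythons also
-- write the result back into the argument lists in place).

-- ===== PORT A =====
def sort_list_by_nrnote_desc (lab_list : List Int) (nrnote_list : List Int) : List (List Int) :=
  let n : Int := lab_list.length
  let res := (PySem.List.pyRange 0 (n - 1) 1).foldl (fun (st : List Int × List Int) i =>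
    (PySem.List.pyRange (i + 1) n 1).foldl (fun (st : List Int × List Int) j =>
      if PySem.List.pyGetD st.2 i 0 ≤ PySem.List.pyGetD st.2 j 0 then
        -- nr = g[i]; g[i] = g[j]; g[j] = nr
        let nr := PySem.List.pyGetD st.2 i 0
        let g1 := PySem.List.pySetD st.2 i (PySem.List.pyGetD st.2 j 0)
        let g2 := PySem.List.pySetD g1 j nr
        -- lab = l[j]; l[j] = l[i]; l[i] = lab
        let lb := PySem.List.pyGetD st.1 j 0
        let l1 := PySem.List.pySetD st.1 j (PySem.List.pyGetD st.1 i 0)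
        let l2 := PySem.List.pySetD l1 i lb
        (l2, g2)
      else st) st) (lab_list, nrnote_list)
  [res.1, res.2]

-- ===== PORT B =====
def sort_list_by_nrnote_desc_alt (lab_list : List Int) (nrnote_list : List Int) : List (List Int) :=
  let order := PySem.List.sorted2 (PySem.List.pyRange 0 (lab_list.length : Int) 1)
      (fun i => -(PySem.List.pyGetD nrnote_list i 0)) (fun i => -i) false
  let labs := order.map (fun i => PySem.List.pyGetD lab_list i 0)
  let grades := order.map (fun i => PySem.List.pyGetD nrnote_list i 0)
  let res := (PySem.List.pyRange 0 (order.length : Int) 1).foldl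
    (fun (st : List Int × List Int) k =>
      (PySem.List.pySetD st.1 k (PySem.List.pyGetD labs k 0),
       PySem.List.pySetD st.2 k (PySem.List.pyGetD grades k 0))) (lab_list, nrnote_list)
  [res.1, res.2]

-- ===== PRECONDITION & SPEC =====
-- Pre_ excludes pairs where nrnote_list is shorter than lab_list: there A raises
-- IndexError, except in the degenerate one-lab case where its loops never run and it
-- returns the lists unsorted (an accident of the loop bounds); B raises there too.
def Pre_sort_list_by_nrnote_desc (lab_list : List Int) (nrnote_list : List Int) : Prop :=
  lab_list.length ≤ nrnote_list.length
instance (lab_list : List Int) (nrnote_list : List Int) : Decidable (Pre_sort_list_by_nrnote_desc lab_list nrnote_list) := by unfold Pre_sort_list_by_nrnote_desc; infer_instance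
def pvWitness_sort_list_by_nrnote_desc : List Int × List Int := ([10, 20, 30], [7, 9, 7])

def Spec_sort_list_by_nrnote_desc (lab_list : List Int) (nrnote_list : List Int) (out : List (List Int)) : Prop := out = sort_list_by_nrnote_desc_alt lab_list nrnote_list
instance (lab_list : List Int) (nrnote_list : List Int) (out : List (List Int)) : Decidable (Spec_sort_list_by_nrnote_desc lab_list nrnote_list out) := by unfold Spec_sort_list_by_nrnote_desc; infer_instance

-- ===== CLAIM (what is proved, stated in full; the proofs are below) =====
def Claim_equal_sort_list_by_nrnote_desc : Prop := ∀ (lab_list : List Int) (nrnote_list : List Int), Dom_sort_list_by_nrnote_desc lab_list nrnote_list → Pre_sort_list_by_nrnote_desc lab_list nrnote_list → Spec_sort_list_by_nrnote_desc lab_list nrnote_list (sort_list_by_nrnote_desc lab_list nrnote_list)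

-- ===== LEMMAS AND PROOFS =====

-- The proof goes through a "ghost" list of triples (lab, grade, original index):
-- A's nested index-swap loops are first simulated on the triples (pvStep / the folds),
-- then shown to compute the structural selection sort pvSel, whose output is a
-- permutation of the triples that is strictly decreasing for (grade, index); B's
-- sort of the index list under the key (-grade, -index) picks out the same unique
-- rearrangement.

-- A's inner-loop body, on triples, Nat indices
def pvStep (c : List (Int × Int × Nat)) (i j : Nat) : List (Int × Int × Nat) :=
  if (c.getD i (0, 0, 0)).2.1 ≤ (c.getD j (0, 0, 0)).2.1 then
    (c.set i (c.getD j (0, 0, 0))).set j (c.getD i (0, 0, 0))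
  else c

-- structural form of A's inner loop: thread the current element through the suffix
def pvInner (cur : Int × Int × Nat) : List (Int × Int × Nat) → (Int × Int × Nat) × List (Int × Int × Nat)
  | [] => (cur, [])
  | x :: xs =>
    if cur.2.1 ≤ x.2.1 then ((pvInner x xs).1, cur :: (pvInner x xs).2)
    else ((pvInner cur xs).1, x :: (pvInner cur xs).2)

theorem pvInner_length (cur : Int × Int × Nat) (xs : List (Int × Int × Nat)) :
    (pvInner cur xs).2.length = xs.length := by
  induction xs generalizing cur with
  | nil => simp [pvInner]
  | cons x xs ih => simp only [pvInner]; split <;> simp [ih]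

-- structural form of A's outer loop (selection sort)
def pvSel : List (Int × Int × Nat) → List (Int × Int × Nat)
  | [] => []
  | x :: xs => (pvInner x xs).1 :: pvSel (pvInner x xs).2
termination_by l => l.length
decreasing_by simp [pvInner_length]

-- strict order "a comes before b": higher grade first, ties by larger original index
def pvLt (a b : Int × Int × Nat) : Prop := b.2.1 < a.2.1 ∨ (a.2.1 = b.2.1 ∧ b.2.2 < a.2.2)

-- invariant: equal grades appear with increasing original indices
def pvInv (l : List (Int × Int × Nat)) : Prop :=
  l.Pairwise (fun a b => a.2.1 = b.2.1 → a.2.2 < b.2.2)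

-- the ghost triple list (lab, grade, index) built from the two inputs
def pvZip3 : List Int → List Int → Nat → List (Int × Int × Nat)
  | a :: as, b :: bs, k => (a, b, k) :: pvZip3 as bs (k + 1)
  | _, _, _ => []

theorem pvInner_perm (cur : Int × Int × Nat) (xs : List (Int × Int × Nat)) :
    ((pvInner cur xs).1 :: (pvInner cur xs).2).Perm (cur :: xs) := by
  induction xs generalizing cur with
  | nil => simp [pvInner]
  | cons x xs ih =>
    simp only [pvInner]; split
    · exact (List.Perm.swap cur (pvInner x xs).1 (pvInner x xs).2).trans ((ih x).cons cur)
    · exact ((List.Perm.swap x (pvInner cur xs).1 (pvInner cur xs).2).trans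
        ((ih cur).cons x)).trans (List.Perm.swap cur x xs)

theorem pvInner_spec (cur : Int × Int × Nat) (xs : List (Int × Int × Nat))
    (h : pvInv (cur :: xs)) :
    (∀ y ∈ (pvInner cur xs).2, pvLt (pvInner cur xs).1 y) ∧ pvInv (pvInner cur xs).2 := by
  induction xs generalizing cur with
  | nil => simp [pvInner, pvInv]
  | cons x xs ih =>
    rw [pvInv, List.pairwise_cons] at h
    obtain ⟨hhead, htail⟩ := h
    simp only [pvInner]; split
    case isTrue hle =>
      obtain ⟨H1, H2⟩ := ih x htail
      have P := pvInner_perm x xs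
      have hxm : x.2.1 ≤ (pvInner x xs).1.2.1 := by
        have hx : x ∈ (pvInner x xs).1 :: (pvInner x xs).2 :=
          P.symm.subset (List.mem_cons_self ..)
        rcases List.mem_cons.1 hx with he | hx
        · exact le_of_eq (congrArg (fun t => t.2.1) he)
        · rcases H1 x hx with hlt | ⟨heq, _⟩
          · exact le_of_lt hlt
          · exact le_of_eq heq.symm
      have hmem_m : (pvInner x xs).1 ∈ x :: xs := P.subset (List.mem_cons_self ..)
      have hmc : pvLt (pvInner x xs).1 cur := by
        rcases lt_or_ge cur.2.1 (pvInner x xs).1.2.1 with hlt | hge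
        · exact Or.inl hlt
        · have heq : cur.2.1 = (pvInner x xs).1.2.1 := le_antisymm (le_trans hle hxm) hge
          exact Or.inr ⟨heq.symm, hhead _ hmem_m heq⟩
      refine ⟨?_, ?_⟩
      · intro y hy
        rcases List.mem_cons.1 hy with rfl | hy
        · exact hmc
        · exact H1 y hy
      · rw [pvInv, List.pairwise_cons]
        refine ⟨?_, H2⟩
        intro y hy hg
        exact hhead y (P.subset (List.mem_cons_of_mem _ hy)) hg
    case isFalse hnle =>
      have hxc : x.2.1 < cur.2.1 := lt_of_not_ge hnle
      have hcx : pvInv (cur :: xs) := by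
        rw [pvInv, List.pairwise_cons]
        exact ⟨fun y hy => hhead y (List.mem_cons_of_mem x hy),
          (List.pairwise_cons.1 htail).2⟩
      obtain ⟨H1, H2⟩ := ih cur hcx
      have P := pvInner_perm cur xs
      have hcm : cur.2.1 ≤ (pvInner cur xs).1.2.1 := by
        have hc : cur ∈ (pvInner cur xs).1 :: (pvInner cur xs).2 :=
          P.symm.subset (List.mem_cons_self ..)
        rcases List.mem_cons.1 hc with he | hc
        · exact le_of_eq (congrArg (fun t => t.2.1) he)
        · rcases H1 cur hc with hlt | ⟨heq, _⟩
          · exact le_of_lt hlt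
          · exact le_of_eq heq.symm
      refine ⟨?_, ?_⟩
      · intro y hy
        rcases List.mem_cons.1 hy with rfl | hy
        · exact Or.inl (lt_of_lt_of_le hxc hcm)
        · exact H1 y hy
      · rw [pvInv, List.pairwise_cons]
        refine ⟨?_, H2⟩
        intro y hy hg
        have hy' : y ∈ cur :: xs := P.subset (List.mem_cons_of_mem _ hy)
        rcases List.mem_cons.1 hy' with rfl | hy2
        · exact absurd hg (by exact fun hh => absurd (hh ▸ hxc) (lt_irrefl _))
        · exact (List.pairwise_cons.1 htail).1 y hy2 hg

theorem pvSel_perm (c : List (Int × Int × Nat)) : (pvSel c).Perm c := by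
  induction c using pvSel.induct with
  | case1 => simp [pvSel]
  | case2 x xs ih =>
    rw [pvSel]
    exact (ih.cons _).trans (pvInner_perm x xs)

theorem pvSel_sorted (c : List (Int × Int × Nat)) : pvInv c → (pvSel c).Pairwise pvLt := by
  induction c using pvSel.induct with
  | case1 => intro _; simp [pvSel]
  | case2 x xs ih =>
    intro h
    obtain ⟨H1, H2⟩ := pvInner_spec x xs h
    rw [pvSel, List.pairwise_cons]
    exact ⟨fun y hy => H1 y ((pvSel_perm _).subset hy), ih H2⟩

-- ---- pvZip3 facts ----

theorem pvZip3_length : ∀ (as bs : List Int) (k : Nat), as.length ≤ bs.length →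
    (pvZip3 as bs k).length = as.length := by
  intro as
  induction as with
  | nil => intro bs k _; cases bs <;> simp [pvZip3]
  | cons a as ih =>
    intro bs k h
    cases bs with
    | nil => simp at h
    | cons b bs => simp [pvZip3]; exact ih bs (k+1) (by simpa using h)

theorem pvZip3_map_fst : ∀ (as bs : List Int) (k : Nat), as.length ≤ bs.length →
    (pvZip3 as bs k).map (·.1) = as := by
  intro as
  induction as with
  | nil => intro bs k _; cases bs <;> simp [pvZip3]
  | cons a as ih =>
    intro bs k h
    cases bs with
    | nil => simp at h
    | cons b bs => simp [pvZip3]; exact ih bs (k+1) (by simpa using h)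

theorem pvZip3_map_g : ∀ (as bs : List Int) (k : Nat), as.length ≤ bs.length →
    (pvZip3 as bs k).map (·.2.1) = bs.take as.length := by
  intro as
  induction as with
  | nil => intro bs k _; cases bs <;> simp [pvZip3]
  | cons a as ih =>
    intro bs k h
    cases bs with
    | nil => simp at h
    | cons b bs => simp [pvZip3]; exact ih bs (k+1) (by simpa using h)

theorem pvZip3_mem : ∀ (as bs : List Int) (k : Nat) (t : Int × Int × Nat),
    t ∈ pvZip3 as bs k →
    k ≤ t.2.2 ∧ t.2.2 < k + as.length ∧ as[t.2.2 - k]? = some t.1 ∧ bs[t.2.2 - k]? = some t.2.1 := by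
  intro as
  induction as with
  | nil => intro bs k t ht; cases bs <;> simp [pvZip3] at ht
  | cons a as ih =>
    intro bs k t ht
    cases bs with
    | nil => simp [pvZip3] at ht
    | cons b bs =>
      simp only [pvZip3, List.mem_cons] at ht
      rcases ht with rfl | ht
      · simp
      · obtain ⟨h1, h2, h3, h4⟩ := ih bs (k+1) t ht
        refine ⟨by omega, by simp; omega, ?_, ?_⟩
        · have : t.2.2 - k = (t.2.2 - (k+1)) + 1 := by omega
          rw [this]; simpa using h3
        · have : t.2.2 - k = (t.2.2 - (k+1)) + 1 := by omega
          rw [this]; simpa using h4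

theorem pvZip3_ix_lt : ∀ (as bs : List Int) (k : Nat),
    (pvZip3 as bs k).Pairwise (fun a b => a.2.2 < b.2.2) := by
  intro as
  induction as with
  | nil => intro bs k; cases bs <;> simp [pvZip3]
  | cons a as ih =>
    intro bs k
    cases bs with
    | nil => simp [pvZip3]
    | cons b bs =>
      simp only [pvZip3]
      rw [List.pairwise_cons]
      refine ⟨?_, ih bs (k+1)⟩
      intro t ht
      have := (pvZip3_mem as bs (k+1) t ht).1
      simpa using by omega

theorem pvZip3_inv (as bs : List Int) (k : Nat) : pvInv (pvZip3 as bs k) := by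
  rw [pvInv]
  refine List.Pairwise.imp ?_ (pvZip3_ix_lt as bs k)
  exact fun h _ => h

theorem pvZip3_map_ix : ∀ (as bs : List Int) (k : Nat), as.length ≤ bs.length →
    (pvZip3 as bs k).map (fun t => (t.2.2 : Int)) = PySem.List.pyRange k (k + as.length) 1 := by
  intro as
  induction as with
  | nil =>
    intro bs k _
    cases bs <;> simp [pvZip3, PySem.List.pyRange_one_eq_nil]
  | cons a as ih =>
    intro bs k h
    cases bs with
    | nil => simp at h
    | cons b bs =>
      simp only [pvZip3, List.map_cons]
      rw [PySem.List.pyRange_one_cons (by simp only [List.length_cons]; push_cast; omega)]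
      congr 1
      have := ih bs (k+1) (by simpa using h)
      rw [this]
      congr 1
      simp only [List.length_cons]; push_cast; omega

-- ---- index-fold to structural recursion ----

theorem pvSel_short (l : List (Int × Int × Nat)) (h : l.length ≤ 1) : pvSel l = l := by
  match l, h with
  | [], _ => simp [pvSel]
  | [x], _ => simp [pvSel, pvInner]

theorem pvInnerFold (i : Nat) : ∀ (m : Nat) (cs : List (Int × Int × Nat)) (j0 : Nat),
    m = cs.length - j0 → i < j0 → j0 ≤ cs.length →
    (List.range' j0 m).foldl (fun cs j => pvStep cs i j) cs
      = (cs.take j0).set i (pvInner (cs.getD i (0,0,0)) (cs.drop j0)).1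
          ++ (pvInner (cs.getD i (0,0,0)) (cs.drop j0)).2 := by
  intro m
  induction m with
  | zero =>
    intro cs j0 hm hij hj
    have hj0 : j0 = cs.length := by omega
    subst hj0
    simp only [List.range'_zero, List.foldl_nil, List.drop_length, pvInner,
      List.take_length, List.append_nil]
    rw [List.getD_eq_getElem cs _ (by omega), List.set_getElem_self]
  | succ m ihm =>
    intro cs j0 hm hij hj
    have hjlt : j0 < cs.length := by omega
    have hilt : i < cs.length := by omega
    rw [List.range'_succ, List.foldl_cons]
    have hdrop : cs.drop j0 = cs[j0]'hjlt :: cs.drop (j0 + 1) := List.drop_eq_getElem_cons hjlt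
    have hgi : cs.getD i (0,0,0) = cs[i]'hilt := List.getD_eq_getElem cs _ hilt
    have hgj : cs.getD j0 (0,0,0) = cs[j0]'hjlt := List.getD_eq_getElem cs _ hjlt
    by_cases hcond : (cs.getD i (0,0,0)).2.1 ≤ (cs.getD j0 (0,0,0)).2.1
    · -- swap branch
      have hstep : pvStep cs i j0 = (cs.set i cs[j0]).set j0 cs[i] := by
        rw [pvStep, if_pos hcond, hgi, hgj]
      rw [hstep]
      set cs' := (cs.set i cs[j0]).set j0 cs[i] with hc'
      have hlen' : cs'.length = cs.length := by simp [hc']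
      rw [ihm cs' (j0+1) (by omega) (by omega) (by omega)]
      have hgi' : cs'.getD i (0,0,0) = cs[j0] := by
        rw [List.getD_eq_getElem cs' _ (by omega)]
        simp only [hc', List.getElem_set]
        rw [if_neg (by omega)]
        simp
      have hdrop' : cs'.drop (j0+1) = cs.drop (j0+1) := by
        rw [hc', List.drop_set, if_pos (by omega), List.drop_set, if_pos (by omega)]
      have htake' : cs'.take (j0+1) = (cs.take j0).set i cs[j0] ++ [cs[i]] := by
        apply List.ext_getElem
        · simp only [List.length_take, hlen', List.length_append, List.length_set,
            List.length_cons, List.length_nil]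
          omega
        · intro k hk1 hk2
          have hb1 : k < j0 + 1 := by
            simp only [List.length_take, hlen'] at hk1; omega
          have hb2 : k < cs.length := by
            simp only [List.length_take, hlen'] at hk1; omega
          simp only [hc', List.getElem_take, List.getElem_set, List.getElem_append,
            List.length_take, List.length_set, List.getElem_singleton]
          split_ifs <;> first | rfl | (exfalso; omega)
      rw [hgi', hdrop', htake', hgi, hdrop]
      simp only [pvInner]
      rw [if_pos (by rw [hgi, hgj] at hcond; exact hcond)]
      rw [List.set_append, if_pos (by simp; omega)]
      rw [List.set_set]
      simp
    · -- no-swap branch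
      have hstep : pvStep cs i j0 = cs := by rw [pvStep, if_neg hcond]
      rw [hstep]
      rw [ihm cs (j0+1) (by omega) (by omega) (by omega)]
      rw [hgi, hdrop]
      simp only [pvInner]
      rw [if_neg (by rw [hgi, hgj] at hcond; exact hcond)]
      rw [List.take_add_one]
      have hsome : cs[j0]? = some cs[j0] := List.getElem?_eq_getElem hjlt
      rw [hsome]
      simp only [Option.toList_some]
      rw [List.set_append, if_pos (by simp; omega)]
      simp

theorem pvOuterFold (L : Nat) : ∀ (m : Nat) (cs : List (Int × Int × Nat)) (i0 : Nat),
    cs.length = L → m = (L - 1) - i0 → i0 ≤ L →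
    (List.range' i0 m).foldl
        (fun cs i => (List.range' (i+1) (L - (i+1))).foldl (fun cs j => pvStep cs i j) cs) cs
      = cs.take i0 ++ pvSel (cs.drop i0) := by
  intro m
  induction m with
  | zero =>
    intro cs i0 hc hm hi
    simp only [List.range'_zero, List.foldl_nil]
    rw [pvSel_short _ (by simp; omega)]
    simp
  | succ m ihm =>
    intro cs i0 hc hm hi
    have hilt : i0 < L := by omega
    rw [List.range'_succ, List.foldl_cons]
    have hinner := pvInnerFold i0 (L - (i0+1)) cs (i0+1) (by omega) (by omega) (by omega)
    rw [hinner]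
    have hgi : cs.getD i0 (0,0,0) = cs[i0]'(by omega) := List.getD_eq_getElem cs _ (by omega)
    set p := pvInner (cs.getD i0 (0,0,0)) (cs.drop (i0+1)) with hp
    have hc1 : (cs.take (i0+1)).set i0 p.1 ++ p.2 = (cs.take i0 ++ [p.1]) ++ p.2 := by
      congr 1
      apply List.ext_getElem
      · simp only [List.length_set, List.length_take, List.length_append,
          List.length_cons, List.length_nil]
        omega
      · intro k hk1 hk2
        have hb1 : k < i0 + 1 := by
          simp only [List.length_set, List.length_take] at hk1; omega
        have hb2 : k < cs.length := by
          simp only [List.length_set, List.length_take] at hk1; omega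
        simp only [List.getElem_set, List.getElem_take, List.getElem_append,
          List.length_take, List.getElem_singleton]
        split_ifs <;> first | rfl | (exfalso; omega)
    rw [hc1]
    have hlenp : p.2.length = L - (i0+1) := by
      rw [hp, pvInner_length]; simp; omega
    have hlen1 : (cs.take i0 ++ [p.1]).length = i0 + 1 := by simp; omega
    rw [ihm ((cs.take i0 ++ [p.1]) ++ p.2) (i0+1) (by simp; omega) (by omega) (by omega)]
    have ht : ((cs.take i0 ++ [p.1]) ++ p.2).take (i0+1) = cs.take i0 ++ [p.1] := by
      rw [← hlen1, List.take_left]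
    have hd : ((cs.take i0 ++ [p.1]) ++ p.2).drop (i0+1) = p.2 := by
      rw [← hlen1, List.drop_left]
    rw [ht, hd]
    have hdrop : cs.drop i0 = cs[i0]'(by omega) :: cs.drop (i0+1) := List.drop_eq_getElem_cons (by omega)
    rw [hdrop, pvSel]
    rw [← hgi, ← hp]
    simp

-- ---- pair-state / triple-state simulation ----

theorem pvFoldlRel {β γ ι : Type} (R : β → γ → Prop) (f : β → ι → β) (g : γ → ι → γ) :
    ∀ (l : List ι) (b : β) (c : γ), R b c →
      (∀ b c i, i ∈ l → R b c → R (f b i) (g c i)) →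
      R (l.foldl f b) (l.foldl g c) := by
  intro l
  induction l with
  | nil => intro b c h _; simpa using h
  | cons x l ih =>
    intro b c h hstep
    simp only [List.foldl_cons]
    exact ih _ _ (hstep b c x (List.mem_cons_self ..) h)
      (fun b c i hi => hstep b c i (List.mem_cons_of_mem _ hi))


-- ---- casting the Int ranges of the port to Nat ranges ----

theorem pvRangeCast (a b : Nat) :
    PySem.List.pyRange (a : Int) (b : Int) 1 = (List.range' a (b - a)).map (Nat.cast : Nat → Int) := by
  rw [PySem.List.pyRange_one, List.range'_eq_map_range, List.map_map]
  have h : ((b : Int) - (a : Int)).toNat = b - a := by omega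
  rw [h]
  apply List.map_congr_left
  intro k _
  simp [Function.comp]

theorem pvRangeCast0 (b : Nat) :
    PySem.List.pyRange 0 (b : Int) 1 = (List.range' 0 b).map (Nat.cast : Nat → Int) := by
  have := pvRangeCast 0 b
  simpa using this

-- the port's loop body, in Nat-index form
def pvPairStep (i j : Nat) (st : List Int × List Int) : List Int × List Int :=
  if st.2.getD i 0 ≤ st.2.getD j 0 then
    ((st.1.set j (st.1.getD i 0)).set i (st.1.getD j 0),
     (st.2.set i (st.2.getD j 0)).set j (st.2.getD i 0))
  else st

def pvPairFold (L : Nat) (st : List Int × List Int) : List Int × List Int :=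
  (List.range' 0 (L - 1)).foldl
    (fun st i => (List.range' (i + 1) (L - (i + 1))).foldl (fun st j => pvPairStep i j st) st) st

theorem pvA_to_nat (lab nr : List Int) (hpos : 0 < lab.length) :
    sort_list_by_nrnote_desc lab nr =
      [(pvPairFold lab.length (lab, nr)).1, (pvPairFold lab.length (lab, nr)).2] := by
  simp only [sort_list_by_nrnote_desc, pvPairFold]
  have h1 : ((lab.length : Int) - 1) = ((lab.length - 1 : Nat) : Int) := by omega
  rw [h1, pvRangeCast0 (lab.length - 1), List.foldl_map]
  have hfun : ∀ (st : List Int × List Int) (k : Nat),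
      (PySem.List.pyRange ((k : Int) + 1) (lab.length : Int) 1).foldl
        (fun (st : List Int × List Int) j =>
          if PySem.List.pyGetD st.2 (k : Int) 0 ≤ PySem.List.pyGetD st.2 j 0 then
            (PySem.List.pySetD (PySem.List.pySetD st.1 j (PySem.List.pyGetD st.1 (k : Int) 0)) (k : Int)
               (PySem.List.pyGetD st.1 j 0),
             PySem.List.pySetD (PySem.List.pySetD st.2 (k : Int) (PySem.List.pyGetD st.2 j 0)) j
               (PySem.List.pyGetD st.2 (k : Int) 0))
          else st) st
      = (List.range' (k + 1) (lab.length - (k + 1))).foldl (fun st j => pvPairStep k j st) st := by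
    intro st k
    have h2 : ((k : Int) + 1) = ((k + 1 : Nat) : Int) := by push_cast; ring
    rw [h2, pvRangeCast (k + 1) lab.length, List.foldl_map]
    simp only [PySem.List.pyGetD_natCast, PySem.List.pySetD_natCast, pvPairStep]
  simp only [hfun]

-- one loop-body step of the pair state is simulated by pvStep on the ghost triples
theorem pvStepSim (nr : List Int) (L i j : Nat) (hij : i < j) (hjL : j < L)
    (st : List Int × List Int) (c : List (Int × Int × Nat))
    (h1 : st.1 = c.map (·.1)) (h2 : st.2 = c.map (·.2.1) ++ nr.drop L) (h3 : c.length = L) :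
    (pvPairStep i j st).1 = (pvStep c i j).map (·.1) ∧
    (pvPairStep i j st).2 = (pvStep c i j).map (·.2.1) ++ nr.drop L ∧
    (pvStep c i j).length = L := by
  have hiL : i < L := by omega
  have hgd : ∀ (f : Int × Int × Nat → Int) (k : Nat), k < c.length →
      (c.map f).getD k 0 = f (c.getD k (0,0,0)) := by
    intro f k hk
    rw [List.getD_eq_getElem _ _ (by simpa using hk), List.getD_eq_getElem _ _ hk, List.getElem_map]
  have hga : ∀ (k : Nat), k < c.length → st.2.getD k 0 = (c.getD k (0,0,0)).2.1 := by
    intro k hk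
    rw [h2, List.getD_append _ _ _ _ (by simpa using hk), hgd _ k hk]
  have hla : ∀ (k : Nat), k < c.length → st.1.getD k 0 = (c.getD k (0,0,0)).1 := by
    intro k hk
    rw [h1, hgd _ k hk]
  have hseta : ∀ (v : Int) (k : Nat), k < c.length →
      ((c.map (·.2.1)) ++ nr.drop L).set k v = (c.map (·.2.1)).set k v ++ nr.drop L := by
    intro v k hk
    rw [List.set_append, if_pos (by simpa using hk)]
  rw [pvPairStep, pvStep]
  by_cases hcond : (c.getD i (0,0,0)).2.1 ≤ (c.getD j (0,0,0)).2.1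
  · rw [if_pos (by rw [hga i (by omega), hga j (by omega)]; exact hcond), if_pos hcond]
    refine ⟨?_, ?_, by simp [h3]⟩
    · rw [hla i (by omega), hla j (by omega), h1]
      rw [List.map_set, List.map_set]
      rw [List.set_comm _ _ (by omega)]
    · rw [hga i (by omega), hga j (by omega), h2]
      rw [hseta _ i (by omega)]
      rw [List.set_append, if_pos (by simp; omega)]
      rw [List.map_set, List.map_set]
  · rw [if_neg (by rw [hga i (by omega), hga j (by omega)]; exact hcond), if_neg hcond]
    exact ⟨h1, h2, h3⟩

theorem pvPairFold_eq (lab nr : List Int) (L : Nat) (hL : lab.length = L) (h : L ≤ nr.length) :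
    pvPairFold L (lab, nr) =
      ((pvSel (pvZip3 lab (nr.take L) 0)).map (·.1),
       (pvSel (pvZip3 lab (nr.take L) 0)).map (·.2.1) ++ nr.drop L) := by
  have hlab : lab.length ≤ (nr.take L).length := by simp; omega
  have hlen : (pvZip3 lab (nr.take L) 0).length = L := by rw [pvZip3_length _ _ _ hlab, hL]
  have hR := pvFoldlRel
    (fun (st : List Int × List Int) (c : List (Int × Int × Nat)) =>
      st.1 = c.map (·.1) ∧ st.2 = c.map (·.2.1) ++ nr.drop L ∧ c.length = L)
    (fun st i => (List.range' (i + 1) (L - (i + 1))).foldl (fun st j => pvPairStep i j st) st)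
    (fun c i => (List.range' (i + 1) (L - (i + 1))).foldl (fun c j => pvStep c i j) c)
    (List.range' 0 (L - 1)) (lab, nr) (pvZip3 lab (nr.take L) 0)
    ⟨(pvZip3_map_fst _ _ _ hlab).symm,
     by
      rw [pvZip3_map_g lab (nr.take L) 0 hlab, hL, List.take_take, min_self,
        List.take_append_drop],
     hlen⟩
    (fun st c i hi hRc => by
      have hi' : i < L - 1 := by have := List.mem_range'_1.1 hi; omega
      exact pvFoldlRel
        (fun (st : List Int × List Int) (c : List (Int × Int × Nat)) =>
          st.1 = c.map (·.1) ∧ st.2 = c.map (·.2.1) ++ nr.drop L ∧ c.length = L)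
        (fun st j => pvPairStep i j st) (fun c j => pvStep c i j)
        (List.range' (i + 1) (L - (i + 1))) st c hRc
        (fun st c j hj hRc => by
          have hj' := List.mem_range'_1.1 hj
          obtain ⟨t1, t2, t3⟩ := hRc
          exact pvStepSim nr L i j (by omega) (by omega) st c t1 t2 t3))
  obtain ⟨e1, e2, e3⟩ := hR
  have houter := pvOuterFold L (L - 1) (pvZip3 lab (nr.take L) 0) 0 hlen (by omega) (by omega)
  rw [houter] at e1 e2
  simp only [List.take_zero, List.drop_zero, List.nil_append] at e1 e2
  refine Prod.ext ?_ ?_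
  · exact e1
  · exact e2


-- ---- B side: the sorted index list is exactly the index trace of pvSel ----

theorem pvMemFacts (lab nr : List Int) (_h : lab.length ≤ nr.length) :
    ∀ t ∈ pvSel (pvZip3 lab (nr.take lab.length) 0),
      t.2.2 < lab.length ∧ lab[t.2.2]? = some t.1 ∧ nr[t.2.2]? = some t.2.1 := by
  intro t ht
  have ht' := (pvSel_perm _).subset ht
  obtain ⟨-, h2, h3, h4⟩ := pvZip3_mem lab (nr.take lab.length) 0 t ht'
  simp only [Nat.sub_zero] at h2 h3 h4
  refine ⟨by omega, h3, ?_⟩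
  rw [List.getElem?_take] at h4
  rw [if_pos (by omega)] at h4
  exact h4

-- Python's tuple key compares lexicographically: sorted2 is sorted under the lex key
theorem pvSorted2_to_sorted {α : Type} (xs : List α) (k1 k2 : α → Int) :
    PySem.List.sorted2 xs k1 k2 false
      = PySem.List.sorted xs (fun x => toLex (k1 x, k2 x)) false := by
  simp only [PySem.List.sorted2, PySem.List.sorted, Bool.false_eq_true, if_false]
  congr 1
  funext acc x
  congr 1
  funext a b
  by_cases h1 : k1 a < k1 b
  · simp [h1, Prod.Lex.toLex_lt_toLex]
  · by_cases h2 : k1 b < k1 a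
    · simp [h1, h2, Prod.Lex.toLex_lt_toLex, show ¬ k1 a = k1 b by omega]
    · simp [Prod.Lex.toLex_lt_toLex, show k1 a = k1 b by omega]

theorem pvSorted_eq (lab nr : List Int) (h : lab.length ≤ nr.length) :
    PySem.List.sorted2 (PySem.List.pyRange 0 (lab.length : Int) 1)
      (fun i => -(PySem.List.pyGetD nr i 0)) (fun i => -i) false
      = (pvSel (pvZip3 lab (nr.take lab.length) 0)).map (fun t => (t.2.2 : Int)) := by
  have hlab : lab.length ≤ (nr.take lab.length).length := by simp; omega
  rw [pvSorted2_to_sorted]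
  apply PySem.List.sorted_eq_of_perm_of_pairwise_lt
  · have hp : ((pvSel (pvZip3 lab (nr.take lab.length) 0)).map (fun t => (t.2.2 : Int))).Perm
        ((pvZip3 lab (nr.take lab.length) 0).map (fun t => (t.2.2 : Int))) :=
      (pvSel_perm _).map _
    rw [pvZip3_map_ix lab (nr.take lab.length) 0 hlab] at hp
    simpa using hp
  · have hs := pvSel_sorted _ (pvZip3_inv lab (nr.take lab.length) 0)
    rw [List.pairwise_map]
    refine List.Pairwise.imp_of_mem ?_ hs
    intro a b ha hb hab
    obtain ⟨haL, -, hag⟩ := pvMemFacts lab nr h a ha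
    obtain ⟨hbL, -, hbg⟩ := pvMemFacts lab nr h b hb
    have hga' : PySem.List.pyGetD nr (a.2.2 : Int) 0 = a.2.1 := by
      rw [PySem.List.pyGetD_natCast, List.getD_eq_getElem _ _ (by omega)]
      have h5 : nr[a.2.2]? = some (nr[a.2.2]'(by omega)) := List.getElem?_eq_getElem (by omega)
      exact Option.some.inj (h5.symm.trans hag)
    have hgb' : PySem.List.pyGetD nr (b.2.2 : Int) 0 = b.2.1 := by
      rw [PySem.List.pyGetD_natCast, List.getD_eq_getElem _ _ (by omega)]
      have h5 : nr[b.2.2]? = some (nr[b.2.2]'(by omega)) := List.getElem?_eq_getElem (by omega)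
      exact Option.some.inj (h5.symm.trans hbg)
    rw [Prod.Lex.toLex_lt_toLex]
    simp only [hga', hgb']
    rcases hab with hlt | ⟨heq, hixlt⟩
    · exact Or.inl (by omega)
    · refine Or.inr ⟨by omega, ?_⟩
      have : ((b.2.2 : Nat) : Int) < ((a.2.2 : Nat) : Int) := by exact_mod_cast hixlt
      omega

-- a fold over a pair whose components are updated independently splits
theorem pvFoldPair {ι β γ : Type} (f : β → ι → β) (g : γ → ι → γ) :
    ∀ (l : List ι) (b : β) (c : γ),
      l.foldl (fun st i => (f st.1 i, g st.2 i)) (b, c) = (l.foldl f b, l.foldl g c) := by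
  intro l
  induction l with
  | nil => intro b c; rfl
  | cons x l ih => intro b c; simp only [List.foldl_cons]; exact ih (f b x) (g c x)

-- writing xs elementwise into the slots s, s+1, … of l
theorem pvWriteRange (xs : List Int) : ∀ (m s : Nat) (l : List Int), s + m ≤ l.length →
    (List.range' s m).foldl (fun acc k => acc.set k (xs.getD k 0)) l
      = l.take s ++ (List.range' s m).map (fun k => xs.getD k 0) ++ l.drop (s + m) := by
  intro m
  induction m with
  | zero =>
    intro s l h
    simp
  | succ m ihm =>
    intro s l h
    rw [List.range'_succ, List.foldl_cons, List.map_cons]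
    rw [ihm (s + 1) (l.set s (xs.getD s 0)) (by simp; omega)]
    have ht : (l.set s (xs.getD s 0)).take (s + 1) = l.take s ++ [xs.getD s 0] := by
      apply List.ext_getElem
      · simp; omega
      · intro k hk1 hk2
        have hkb : k < s + 1 := by simp at hk1; omega
        have hkl : k < l.length := by omega
        simp only [List.getElem_take, List.getElem_set, List.getElem_append,
          List.length_take, List.getElem_singleton]
        split_ifs <;> first | rfl | (exfalso; omega)
    have hd : (l.set s (xs.getD s 0)).drop (s + 1 + m) = l.drop (s + (m + 1)) := by
      rw [List.drop_set, if_pos (by omega)]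
      congr 1
      omega
    rw [ht, hd]
    simp

-- gathering xs back out of the written slots is xs itself
theorem pvMapGetD (xs : List Int) :
    (List.range' 0 xs.length).map (fun k => xs.getD k 0) = xs := by
  apply List.ext_getElem
  · simp
  · intro k hk1 hk2
    simp only [List.getElem_map, List.getElem_range']
    rw [List.getD_eq_getElem _ _ (by simpa using hk1)]
    congr 1
    omega

theorem pvB_eq (lab nr : List Int) (h : lab.length ≤ nr.length) :
    sort_list_by_nrnote_desc_alt lab nr =
      [(pvSel (pvZip3 lab (nr.take lab.length) 0)).map (·.1),
       (pvSel (pvZip3 lab (nr.take lab.length) 0)).map (·.2.1) ++ nr.drop lab.length] := by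
  simp only [sort_list_by_nrnote_desc_alt]
  rw [pvSorted_eq lab nr h]
  rw [List.map_map, List.map_map]
  have h1 : (pvSel (pvZip3 lab (nr.take lab.length) 0)).map
      ((fun i => PySem.List.pyGetD lab i 0) ∘ (fun t => (t.2.2 : Int)))
      = (pvSel (pvZip3 lab (nr.take lab.length) 0)).map (·.1) := by
    apply List.map_congr_left
    intro t ht
    obtain ⟨htL, htl, -⟩ := pvMemFacts lab nr h t ht
    simp only [Function.comp]
    rw [PySem.List.pyGetD_natCast, List.getD_eq_getElem _ _ (by omega)]
    have h5 : lab[t.2.2]? = some (lab[t.2.2]'(by omega)) := List.getElem?_eq_getElem (by omega)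
    exact Option.some.inj (h5.symm.trans htl)
  have h2 : (pvSel (pvZip3 lab (nr.take lab.length) 0)).map
      ((fun i => PySem.List.pyGetD nr i 0) ∘ (fun t => (t.2.2 : Int)))
      = (pvSel (pvZip3 lab (nr.take lab.length) 0)).map (·.2.1) := by
    apply List.map_congr_left
    intro t ht
    obtain ⟨htL, -, htg⟩ := pvMemFacts lab nr h t ht
    simp only [Function.comp]
    rw [PySem.List.pyGetD_natCast, List.getD_eq_getElem _ _ (by omega)]
    have h5 : nr[t.2.2]? = some (nr[t.2.2]'(by omega)) := List.getElem?_eq_getElem (by omega)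
    exact Option.some.inj (h5.symm.trans htg)
  rw [h1, h2]
  set S := pvSel (pvZip3 lab (nr.take lab.length) 0) with hS
  have hlen : S.length = lab.length := by
    rw [hS, (pvSel_perm _).length_eq,
      pvZip3_length _ _ _ (by simp; omega)]
  have hmlen : (S.map (fun t => (t.2.2 : Int))).length = lab.length := by simp [hlen]
  rw [hmlen, pvRangeCast0 lab.length, List.foldl_map]
  simp only [PySem.List.pyGetD_natCast, PySem.List.pySetD_natCast]
  rw [pvFoldPair (fun acc k => acc.set k ((S.map (·.1)).getD k 0))
      (fun acc k => acc.set k ((S.map (·.2.1)).getD k 0)) (List.range' 0 lab.length) lab nr]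
  have e1 : (List.range' 0 lab.length).foldl
      (fun acc k => acc.set k ((S.map (·.1)).getD k 0)) lab = S.map (·.1) := by
    have := pvWriteRange (S.map (·.1)) lab.length 0 lab (by omega)
    rw [this]
    have hx : lab.length = (S.map (·.1)).length := by simp [hlen]
    rw [hx, pvMapGetD]
    simp [← hx]
  have e2 : (List.range' 0 lab.length).foldl
      (fun acc k => acc.set k ((S.map (·.2.1)).getD k 0)) nr
      = S.map (·.2.1) ++ nr.drop lab.length := by
    have := pvWriteRange (S.map (·.2.1)) lab.length 0 nr (by omega)
    rw [this]
    have hx : lab.length = (S.map (·.2.1)).length := by simp [hlen]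
    rw [hx, pvMapGetD]
    simp [← hx]
  rw [e1, e2]

-- ===== VERDICT (by name: the statement is the Claim_ definition above) =====
theorem sort_list_by_nrnote_desc_spec : Claim_equal_sort_list_by_nrnote_desc := by
  intro lab nr _hdom hpre
  have hpre' : lab.length ≤ nr.length := hpre
  unfold Spec_sort_list_by_nrnote_desc
  by_cases h0 : lab.length = 0
  · have hlab : lab = [] := by cases lab with | nil => rfl | cons a as => simp at h0
    subst hlab
    have hA : sort_list_by_nrnote_desc [] nr = [[], nr] := by
      simp only [sort_list_by_nrnote_desc, List.length_nil, Nat.cast_zero, zero_sub]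
      rw [PySem.List.pyRange_one_eq_nil (by norm_num)]
      simp
    have hB : sort_list_by_nrnote_desc_alt [] nr = [[], nr] := by
      simp only [sort_list_by_nrnote_desc_alt, List.length_nil, Nat.cast_zero]
      rw [PySem.List.pyRange_one_eq_nil (le_refl 0)]
      have hnil : PySem.List.sorted2 ([] : List Int)
          (fun i => -(PySem.List.pyGetD nr i 0)) (fun i => -i) false = [] :=
        (PySem.List.sorted2_perm _ _ _ _).eq_nil
      rw [hnil]
      simp only [List.map_nil, List.length_nil, Nat.cast_zero]
      rw [PySem.List.pyRange_one_eq_nil (le_refl 0)]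
      simp
    rw [hA, hB]
  · have hpos : 0 < lab.length := Nat.pos_of_ne_zero h0
    rw [pvA_to_nat lab nr hpos, pvPairFold_eq lab nr lab.length rfl hpre',
      pvB_eq lab nr hpre']
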